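-- pv_equiv track=rewrite | github.com/wso2/reference-implementations-afm | python-interpreter/packages/afm-core/src/afm/parser.py | _extract_role_and_instructions
-- ===== SOURCE A (Python) =====
-- def _extract_role_and_instructions(
--     lines: list[str], start_index: int
-- ) -> tuple[str, str]:
--     role_lines: list[str] = []
--     instructions_lines: list[str] = []
--
--     in_role = False
--     in_instructions = False
--
--     for i in range(start_index, len(lines)):
--         line = lines[i]
--         stripped = line.strip()
--
--         if stripped.startswith("# "):
--             heading = stripped[2:].strip().lower()
--             if heading == "role":
--                 in_role = True
--                 in_instructions = False
--                 continue
--             elif heading == "instructions":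
--                 in_role = False
--                 in_instructions = True
--                 continue
--             else:
--                 # Different heading - stop current section
--                 in_role = False
--                 in_instructions = False
--
--         if in_role:
--             role_lines.append(line)
--         elif in_instructions:
--             instructions_lines.append(line)
--
--     role = "\n".join(role_lines).strip()
--     instructions = "\n".join(instructions_lines).strip()
--
--     return role, instructions
-- ===== SOURCE B (Python) =====
-- def _extract_role_and_instructions(lines, start_index):
--     # Pass 1: parse the scanned lines into (heading, body) segments.
--     seq = [lines[i] for i in range(start_index, len(lines))]
--     segments = []
--     i, n = 0, len(seq)
--     while i < n:
--         s = seq[i].strip()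
--         i += 1
--         if s.startswith("# "):
--             start = i
--             while i < n and not seq[i].strip().startswith("# "):
--                 i += 1
--             segments.append((s[2:].strip().lower(), seq[start:i]))
--     # Pass 2: concatenate the bodies of the wanted headings (merging duplicates).
--     role_lines = [l for name, body in segments if name == "role" for l in body]
--     instructions_lines = [l for name, body in segments if name == "instructions" for l in body]
--     return "\n".join(role_lines).strip(), "\n".join(instructions_lines).strip()
-- ===== Notes on version B (the rewrite author's own statement) =====
-- stated objective: alternative
-- what changed: B replaces A's per-line boolean state machine with a two-pass decomposition: it first parses the scanned lines into (heading, body) segments, then concatenates the bodies of the 'role'/'instructions' segments and joins them.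
import Mathlib
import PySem

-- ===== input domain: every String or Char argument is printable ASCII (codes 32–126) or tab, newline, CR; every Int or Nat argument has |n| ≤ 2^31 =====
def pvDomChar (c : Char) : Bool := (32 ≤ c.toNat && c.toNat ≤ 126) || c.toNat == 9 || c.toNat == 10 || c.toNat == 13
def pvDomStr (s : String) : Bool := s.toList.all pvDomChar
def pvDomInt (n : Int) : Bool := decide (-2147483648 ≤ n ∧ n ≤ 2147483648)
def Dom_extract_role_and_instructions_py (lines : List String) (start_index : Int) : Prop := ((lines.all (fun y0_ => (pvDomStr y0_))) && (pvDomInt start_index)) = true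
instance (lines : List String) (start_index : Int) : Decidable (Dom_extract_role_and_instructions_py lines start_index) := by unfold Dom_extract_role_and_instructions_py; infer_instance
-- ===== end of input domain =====

-- B parses the scanned lines into (heading, body) segments first and then concatenates the
-- bodies of the 'role'/'instructions' segments, instead of A's per-line boolean state machine
-- (objective: alternative decomposition, same cost).


-- ===== PORT A =====
-- the body of A's for-loop over i, as a function of the current state and the line lines[i]
def pvStepA (st : List String × List String × Bool × Bool) (line : String) :
    List String × List String × Bool × Bool :=
  let stripped := PySem.Str.strip line
  if PySem.Str.startswith stripped "# " then
    let heading := PySem.Str.lower (PySem.Str.strip (PySem.Str.slice stripped (some 2) none))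
    if heading == "role" then (st.1, st.2.1, true, false)
    else if heading == "instructions" then (st.1, st.2.1, false, true)
    -- different heading: flags cleared, and the following `if in_role/elif` appends nothing
    else (st.1, st.2.1, false, false)
  else if st.2.2.1 then (st.1 ++ [line], st.2.1, st.2.2.1, st.2.2.2)
  else if st.2.2.2 then (st.1, st.2.1 ++ [line], st.2.2.1, st.2.2.2)
  else st

def extract_role_and_instructions_py (lines : List String) (start_index : Int) : String × String :=
  -- for i in range(start_index, len(lines)): line = lines[i]; …  (lines[i] total under Pre_)
  let st := (PySem.List.pyRange start_index (PySem.List.len lines) 1).foldl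
    (fun st i => pvStepA st (PySem.List.pyGetD lines i "")) ([], [], false, false)
  (PySem.Str.strip (PySem.Str.join "\n" st.1), PySem.Str.strip (PySem.Str.join "\n" st.2.1))

-- ===== PORT B =====
def pvIsHeading (l : String) : Bool := PySem.Str.startswith (PySem.Str.strip l) "# "

def pvName (l : String) : String :=
  PySem.Str.lower (PySem.Str.strip (PySem.Str.slice (PySem.Str.strip l) (some 2) none))

-- first pass of Source B: the (heading, body) segments; the inner `while` scan that advances i to
-- the next heading yields seq[start:i] = takeWhile (non-heading) and continues at dropWhile —
-- exact, since the scan stops at the first heading line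
def pvSegments : List String → List (String × List String)
  | [] => []
  | l :: rest =>
    if pvIsHeading l then
      (pvName l, rest.takeWhile (fun x => !pvIsHeading x)) ::
        pvSegments (rest.dropWhile (fun x => !pvIsHeading x))
    else pvSegments rest
termination_by seq => seq.length
decreasing_by
· simpa using Nat.lt_succ_of_le (List.length_dropWhile_le _ _)
· simp

def extract_role_and_instructions_py_alt (lines : List String) (start_index : Int) : String × String :=
  let seq := (PySem.List.pyRange start_index (PySem.List.len lines) 1).map
    (fun i => PySem.List.pyGetD lines i "")
  let segs := pvSegments seq
  let role_lines := (segs.filter (fun p => p.1 == "role")).flatMap (·.2)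
  let instructions_lines := (segs.filter (fun p => p.1 == "instructions")).flatMap (·.2)
  (PySem.Str.strip (PySem.Str.join "\n" role_lines),
   PySem.Str.strip (PySem.Str.join "\n" instructions_lines))

-- ===== PRECONDITION & SPEC =====
-- Pre_ excludes exactly the inputs where A raises IndexError: lines[i] with i = start_index < -len(lines)
def Pre_extract_role_and_instructions_py (lines : List String) (start_index : Int) : Prop :=
  -(lines.length : Int) ≤ start_index
instance (lines : List String) (start_index : Int) : Decidable (Pre_extract_role_and_instructions_py lines start_index) := by unfold Pre_extract_role_and_instructions_py; infer_instance

def pvWitness_extract_role_and_instructions_py : List String × Int :=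
  (["# Role", "a planner", "# Instructions", "plan"], 0)

def Spec_extract_role_and_instructions_py (lines : List String) (start_index : Int) (out : String × String) : Prop := out = extract_role_and_instructions_py_alt lines start_index
instance (lines : List String) (start_index : Int) (out : String × String) : Decidable (Spec_extract_role_and_instructions_py lines start_index out) := by unfold Spec_extract_role_and_instructions_py; infer_instance

-- ===== CLAIM (what is proved, stated in full; the proofs are below) =====
def Claim_equal_extract_role_and_instructions_py : Prop := ∀ (lines : List String) (start_index : Int), Dom_extract_role_and_instructions_py lines start_index → Pre_extract_role_and_instructions_py lines start_index → Spec_extract_role_and_instructions_py lines start_index (extract_role_and_instructions_py lines start_index)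

-- ===== LEMMAS AND PROOFS =====

-- B's role/instructions line lists, as functions of the scanned line list
def pvR (seq : List String) : List String :=
  ((pvSegments seq).filter (fun p => p.1 == "role")).flatMap (·.2)
def pvI (seq : List String) : List String :=
  ((pvSegments seq).filter (fun p => p.1 == "instructions")).flatMap (·.2)

-- A's step on a heading line neither reads the flags nor touches the accumulators
theorem pvStepA_heading (rl il : List String) (b1 b2 : Bool) (l : String)
    (h : pvIsHeading l = true) :
    pvStepA (rl, il, b1, b2) l =
      (rl, il, pvName l == "role", !(pvName l == "role") && (pvName l == "instructions")) := by
  simp only [pvIsHeading] at h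
  by_cases h1 : pvName l == "role" <;> by_cases h2 : pvName l == "instructions" <;>
    simp_all [pvStepA, pvName]

-- A's step on a non-heading line appends it to the section the flags select
theorem pvStepA_not_heading (rl il : List String) (b1 b2 : Bool) (l : String)
    (h : pvIsHeading l = false) :
    pvStepA (rl, il, b1, b2) l =
      (rl ++ (if b1 then [l] else []), il ++ (if b1 then [] else if b2 then [l] else []), b1, b2) := by
  simp only [pvIsHeading] at h
  simp only [pvStepA, h, Bool.false_eq_true, if_false]
  cases b1 <;> cases b2 <;> simp

-- folding A's step over a run of non-heading lines appends the whole run to the selected section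
theorem pvFold_run (t : List String) (h : ∀ x ∈ t, pvIsHeading x = false)
    (rl il : List String) (b1 b2 : Bool) :
    t.foldl pvStepA (rl, il, b1, b2) =
      (rl ++ (if b1 then t else []), il ++ (if b1 then [] else if b2 then t else []), b1, b2) := by
  induction t generalizing rl il with
  | nil => simp
  | cons x t ih =>
    have hx : pvIsHeading x = false := h x (List.mem_cons_self ..)
    have ht : ∀ y ∈ t, pvIsHeading y = false := fun y hy => h y (List.mem_cons_of_mem _ hy)
    rw [List.foldl_cons, pvStepA_not_heading _ _ _ _ _ hx, ih ht]
    cases b1 <;> cases b2 <;> simp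

-- the accumulators after folding A's step over a list that is empty or starts with a heading
-- do not depend on the incoming flags
theorem pvFold_reset (d : List String) (hd : d = [] ∨ pvIsHeading d.headI = true)
    (rl il : List String) (b1 b2 : Bool) :
    (d.foldl pvStepA (rl, il, b1, b2)).1 = (d.foldl pvStepA (rl, il, false, false)).1 ∧
    (d.foldl pvStepA (rl, il, b1, b2)).2.1 = (d.foldl pvStepA (rl, il, false, false)).2.1 := by
  cases d with
  | nil => exact ⟨rfl, rfl⟩
  | cons x d =>
    rcases hd with hd | hd
    · simp at hd
    · simp only [List.headI] at hd
      rw [List.foldl_cons, List.foldl_cons, pvStepA_heading _ _ _ _ _ hd,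
        pvStepA_heading _ _ _ _ _ hd]
      exact ⟨rfl, rfl⟩

theorem pvDropWhile_head (p : String → Bool) (l : List String) :
    l.dropWhile p = [] ∨ p ((l.dropWhile p).headI) = false := by
  induction l with
  | nil => exact Or.inl rfl
  | cons x l ih =>
    by_cases hx : p x
    · simpa [List.dropWhile, hx] using ih
    · simp [List.dropWhile, hx, List.headI]

-- MAIN INVARIANT: A's state machine started with both flags off accumulates exactly
-- the concatenated segment bodies that B computes
theorem pvMain (n : ℕ) : ∀ (seq : List String), seq.length ≤ n → ∀ (rl il : List String),
    (seq.foldl pvStepA (rl, il, false, false)).1 = rl ++ pvR seq ∧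
    (seq.foldl pvStepA (rl, il, false, false)).2.1 = il ++ pvI seq := by
  induction n with
  | zero =>
    intro seq hlen rl il
    rw [List.length_eq_zero_iff.mp (Nat.le_zero.mp hlen)]
    simp [pvR, pvI, pvSegments]
  | succ n ih =>
    intro seq hlen rl il
    cases seq with
    | nil => simp [pvR, pvI, pvSegments]
    | cons l rest =>
      simp only [List.length_cons, Nat.succ_le_succ_iff] at hlen
      by_cases hl : pvIsHeading l
      · -- heading line: run over its body, then recurse at the next heading
        set t := rest.takeWhile (fun x => !pvIsHeading x) with ht
        set d := rest.dropWhile (fun x => !pvIsHeading x) with hdd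
        have hrest : rest = t ++ d := (List.takeWhile_append_dropWhile ..).symm
        have htn : ∀ x ∈ t, pvIsHeading x = false := by
          intro x hx
          have := List.mem_takeWhile_imp hx
          simpa using this
        have hdl : d.length ≤ n := by
          have h1 := List.length_dropWhile_le (fun x => !pvIsHeading x) rest
          rw [← hdd] at h1
          omega
        have hdh : d = [] ∨ pvIsHeading d.headI = true := by
          rcases pvDropWhile_head (fun x => !pvIsHeading x) rest with h | h
          · exact Or.inl (by rw [hdd]; exact h)
          · right; rw [hdd]; simpa using h
        have hseg : pvSegments (l :: rest) = (pvName l, t) :: pvSegments d := by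
          rw [pvSegments, if_pos hl]
        have hR : pvR (l :: rest) = (if pvName l == "role" then t else []) ++ pvR d := by
          simp only [pvR, hseg, List.filter_cons]
          by_cases h1 : pvName l == "role" <;> simp [h1]
        have hI : pvI (l :: rest) = (if pvName l == "instructions" then t else []) ++ pvI d := by
          simp only [pvI, hseg, List.filter_cons]
          by_cases h1 : pvName l == "instructions" <;> simp [h1]
        rw [List.foldl_cons, pvStepA_heading _ _ _ _ _ hl]
        rw [show l :: rest = l :: (t ++ d) by rw [← hrest]] at hR hI
        rw [hrest, List.foldl_append, pvFold_run t htn]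
        obtain ⟨r1, r2⟩ := pvFold_reset d hdh _ _ _ _
        obtain ⟨g1, g2⟩ := ih d hdl
          (rl ++ if (pvName l == "role") = true then t else [])
          (il ++ if (pvName l == "role") = true then []
                 else if (!(pvName l == "role") && (pvName l == "instructions")) = true then t else [])
        rw [r1, r2, g1, g2, hR, hI]
        have hne : ¬((pvName l == "role") = true ∧ (pvName l == "instructions") = true) := by
          rintro ⟨a, b⟩
          rw [beq_iff_eq] at a b
          rw [a] at b
          simp at b
        by_cases h1 : (pvName l == "role") = true <;>
          by_cases h2 : (pvName l == "instructions") = true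
        · exact absurd ⟨h1, h2⟩ hne
        all_goals simp [h1, h2, List.append_assoc]
      · -- non-heading line before any wanted heading: dropped by both programs
        have hseg : pvSegments (l :: rest) = pvSegments rest := by
          rw [pvSegments, if_neg hl]
        have hstep : pvStepA (rl, il, false, false) l = (rl, il, false, false) := by
          rw [pvStepA_not_heading _ _ _ _ _ (Bool.eq_false_iff.mpr hl)]; simp
        rw [List.foldl_cons, hstep]
        obtain ⟨g1, g2⟩ := ih rest hlen rl il
        rw [g1, g2]
        simp [pvR, pvI, hseg]

-- ===== VERDICT (by name: the statement is the Claim_ definition above) =====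
theorem extract_role_and_instructions_py_spec : Claim_equal_extract_role_and_instructions_py := by
  intro lines start_index _ _
  unfold Spec_extract_role_and_instructions_py
  unfold extract_role_and_instructions_py extract_role_and_instructions_py_alt
  simp only
  set seq := (PySem.List.pyRange start_index (PySem.List.len lines) 1).map
    (fun i => PySem.List.pyGetD lines i "") with hseq
  rw [show ((PySem.List.pyRange start_index (PySem.List.len lines) 1).foldl
        (fun st i => pvStepA st (PySem.List.pyGetD lines i "")) ([], [], false, false))
      = seq.foldl pvStepA ([], [], false, false) by rw [hseq, List.foldl_map]]
  obtain ⟨g1, g2⟩ := pvMain seq.length seq le_rfl [] []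
  rw [g1, g2]
  simp [pvR, pvI]
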